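-- pv_equiv track=rewrite | github.com/ManuShamil/dayz-server-startup-script | dayz_server_manager.py | _steamcmd_args_to_script_lines
-- ===== SOURCE A (Python) =====
-- def _steamcmd_args_to_script_lines(steamcmd_args: list[str]) -> list[str]:
--     script_lines: list[str] = []
--     index = 0
--     while index < len(steamcmd_args):
--         token = steamcmd_args[index]
--         if not token.startswith("+"):
--             index += 1
--             continue
--
--         parts = [token[1:]]
--         index += 1
--         while index < len(steamcmd_args) and not steamcmd_args[index].startswith("+"):
--             parts.append(steamcmd_args[index])
--             index += 1
--
--         script_lines.append(" ".join(parts))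
--
--     return script_lines
-- ===== SOURCE B (Python) =====
-- def _steamcmd_args_to_script_lines(steamcmd_args: list[str]) -> list[str]:
--     script_lines: list[str] = []
--     current = None
--     for token in steamcmd_args:
--         if token.startswith("+"):
--             if current is not None:
--                 script_lines.append(" ".join(current))
--             current = [token[1:]]
--         elif current is not None:
--             current.append(token)
--     if current is not None:
--         script_lines.append(" ".join(current))
--     return script_lines
-- ===== Notes on version B (the rewrite author's own statement) =====
-- stated objective: simpler
-- what changed: Replaced the index-driven outer while loop with a nested inner scanning while loop by a single linear for-pass that keeps the current segment in an accumulator and flushes it at each '+' boundary and at the end.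
import Mathlib
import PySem

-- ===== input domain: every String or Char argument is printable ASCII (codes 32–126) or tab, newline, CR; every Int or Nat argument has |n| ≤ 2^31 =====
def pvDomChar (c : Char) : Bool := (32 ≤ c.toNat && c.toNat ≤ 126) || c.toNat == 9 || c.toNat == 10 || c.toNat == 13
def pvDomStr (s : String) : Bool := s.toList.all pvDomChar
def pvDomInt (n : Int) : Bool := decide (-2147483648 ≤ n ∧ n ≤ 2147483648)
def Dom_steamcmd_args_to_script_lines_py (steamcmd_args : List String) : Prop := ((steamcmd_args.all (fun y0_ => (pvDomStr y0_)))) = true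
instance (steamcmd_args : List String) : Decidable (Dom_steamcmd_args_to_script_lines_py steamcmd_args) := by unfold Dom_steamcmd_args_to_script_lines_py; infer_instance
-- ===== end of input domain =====

-- B replaces A's outer-index/inner-scan while loops by one accumulator pass (objective: simpler).

-- ===== PORT A =====
-- inner while loop of A: consume tokens until the next '+'-token, appending them to parts
def pvCollectA (xs : List String) (parts : List String) : List String × List String :=
  match xs with
  | [] => (parts, [])
  | t :: rest =>
    if PySem.Str.startswith t "+" then (parts, t :: rest)
    else pvCollectA rest (parts ++ [t])

theorem pvCollectA_len (xs parts : List String) : (pvCollectA xs parts).2.length ≤ xs.length := by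
  induction xs generalizing parts with
  | nil => simp [pvCollectA]
  | cons t rest ih =>
    simp only [pvCollectA]
    split
    · simp
    · exact le_trans (ih _) (by simp)

-- outer while loop of A
def pvLoopA (xs : List String) : List String :=
  match xs with
  | [] => []
  | t :: rest =>
    if PySem.Str.startswith t "+" then
      let pr := pvCollectA rest [PySem.Str.slice t (some 1) none]
      PySem.Str.join " " pr.1 :: pvLoopA pr.2
    else pvLoopA rest
termination_by xs.length
decreasing_by
  · have := pvCollectA_len rest [PySem.Str.slice t (some 1) none]
    simp; omega
  · simp

def steamcmd_args_to_script_lines_py (steamcmd_args : List String) : List String :=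
  pvLoopA steamcmd_args

-- ===== PORT B =====
-- single pass: `cur` is the segment being built (none before the first '+'); flush at each '+' and at the end
def pvGoB (xs : List String) (lines : List String) (cur : Option (List String)) : List String :=
  match xs with
  | [] =>
    match cur with
    | none => lines
    | some c => lines ++ [PySem.Str.join " " c]
  | t :: rest =>
    if PySem.Str.startswith t "+" then
      pvGoB rest
        (match cur with
         | none => lines
         | some c => lines ++ [PySem.Str.join " " c])
        (some [PySem.Str.slice t (some 1) none])
    else
      match cur with
      | none => pvGoB rest lines none
      | some c => pvGoB rest lines (some (c ++ [t]))

def steamcmd_args_to_script_lines_py_alt (steamcmd_args : List String) : List String :=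
  pvGoB steamcmd_args [] none

-- ===== PRECONDITION & SPEC =====
def Spec_steamcmd_args_to_script_lines_py (steamcmd_args : List String) (out : List String) : Prop := out = steamcmd_args_to_script_lines_py_alt steamcmd_args
instance (steamcmd_args : List String) (out : List String) : Decidable (Spec_steamcmd_args_to_script_lines_py steamcmd_args out) := by unfold Spec_steamcmd_args_to_script_lines_py; infer_instance

-- ===== CLAIM (what is proved, stated in full; the proofs are below) =====
def Claim_equal_steamcmd_args_to_script_lines_py : Prop := ∀ (steamcmd_args : List String), Dom_steamcmd_args_to_script_lines_py steamcmd_args → Spec_steamcmd_args_to_script_lines_py steamcmd_args (steamcmd_args_to_script_lines_py steamcmd_args)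

-- ===== LEMMAS AND PROOFS =====

-- while `cur` is open, B's pass does exactly what A's inner collecting loop does
theorem pvGoB_some (xs : List String) (lines parts : List String) :
    pvGoB xs lines (some parts)
      = pvGoB (pvCollectA xs parts).2 (lines ++ [PySem.Str.join " " (pvCollectA xs parts).1]) none := by
  induction xs generalizing parts lines with
  | nil => simp [pvGoB, pvCollectA]
  | cons t rest ih =>
    simp only [pvGoB, pvCollectA]
    split
    · next h =>
      conv_rhs => rw [pvGoB]
      rw [if_pos h]
    · exact ih _ _

-- with `cur` closed, B's pass computes A's outer loop (up to the prefix already emitted)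
theorem pvGoB_none : ∀ (n : ℕ) (xs lines : List String), xs.length ≤ n →
    pvGoB xs lines none = lines ++ pvLoopA xs := by
  intro n
  induction n with
  | zero =>
    intro xs lines h
    have : xs = [] := List.eq_nil_of_length_eq_zero (by omega)
    subst this; simp [pvGoB, pvLoopA]
  | succ n ih =>
    intro xs lines h
    match xs with
    | [] => simp [pvGoB, pvLoopA]
    | t :: rest =>
      simp only [pvGoB, pvLoopA]
      split
      · rw [pvGoB_some]
        have hlen := pvCollectA_len rest [PySem.Str.slice t (some 1) none]
        rw [ih _ _ (by simp at h; omega)]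
        simp
      · exact ih rest lines (by simp at h; omega)

-- ===== VERDICT (by name: the statement is the Claim_ definition above) =====
theorem steamcmd_args_to_script_lines_py_spec : Claim_equal_steamcmd_args_to_script_lines_py := by
  intro xs _
  unfold Spec_steamcmd_args_to_script_lines_py steamcmd_args_to_script_lines_py steamcmd_args_to_script_lines_py_alt
  rw [pvGoB_none xs.length xs [] le_rfl]
  simp
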